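-- pv_equiv track=rewrite | github.com/chris1seto/cumulus | vectornav_provider.py | _verify_crc
-- ===== SOURCE A (Python) =====
-- def _verify_crc(buffer):
--   crc = 0
--
--   for x in range(0, len(buffer)):
--     crc = ((crc >> 8) | (crc << 8)) & 0xffff
--     crc ^= buffer[x]
--     crc ^= ((crc & 0xff) >> 4) & 0xffff
--     crc ^= (crc << 12) & 0xffff
--     crc ^= ((crc & 0x00ff) << 5) & 0xffff
--
--   # Crc of a good packet should be 0x00
--   return (crc == 0)
-- ===== SOURCE B (Python) =====
-- def _verify_crc(buffer):
--   # Table-driven CRC-16-CCITT: precompute the CRC of every byte value by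
--   # bit-serial polynomial division, then absorb each element with one lookup.
--   table = []
--   for i in range(256):
--     r = i << 8
--     for _ in range(8):
--       r = ((r << 1) ^ 0x1021) & 0xffff if (r & 0x8000) else (r << 1) & 0xffff
--     table.append(r)
--   crc = 0
--   for b in buffer:
--     y = (((crc >> 8) | (crc << 8)) & 0xffff) ^ b
--     crc = y ^ (y & 0xff) ^ table[y & 0xff]
--   return crc == 0
-- ===== Notes on version B (the rewrite author's own statement) =====
-- stated objective: faster
-- what changed: Replaces A's per-byte four-step shift/mask/xor CRC update formula with a table-driven CRC-16-CCITT: a 256-entry table is precomputed once by bit-serial polynomial division and each element is then absorbed with a single lookup plus two xors.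
import Mathlib
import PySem

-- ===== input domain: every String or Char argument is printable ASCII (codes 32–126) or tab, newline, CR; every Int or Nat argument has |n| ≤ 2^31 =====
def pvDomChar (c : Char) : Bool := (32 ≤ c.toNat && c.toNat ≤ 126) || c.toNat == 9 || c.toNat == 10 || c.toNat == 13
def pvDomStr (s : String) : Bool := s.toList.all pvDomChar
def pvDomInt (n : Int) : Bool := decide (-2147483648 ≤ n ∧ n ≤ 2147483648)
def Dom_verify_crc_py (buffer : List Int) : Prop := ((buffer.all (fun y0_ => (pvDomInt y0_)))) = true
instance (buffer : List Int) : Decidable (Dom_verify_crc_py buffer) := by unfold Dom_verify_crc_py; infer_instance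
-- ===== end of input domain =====

-- B replaces A's per-byte shift/mask/xor CRC update formula with a table-driven
-- CRC-16-CCITT (table precomputed once by bit-serial polynomial division).

-- ===== PORT A =====
-- the body of A's for-loop (one element absorbed into the running crc)
def stepA (crc b : Int) : Int :=
  let crc := PySem.Int.band (PySem.Int.bor (crc >>> (8:Nat)) (crc <<< (8:Nat))) 0xffff
  let crc := PySem.Int.bxor crc b
  let crc := PySem.Int.bxor crc (PySem.Int.band ((PySem.Int.band crc 0xff) >>> (4:Nat)) 0xffff)
  let crc := PySem.Int.bxor crc (PySem.Int.band (crc <<< (12:Nat)) 0xffff)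
  let crc := PySem.Int.bxor crc (PySem.Int.band ((PySem.Int.band crc 0x00ff) <<< (5:Nat)) 0xffff)
  crc

def verify_crc_py (buffer : List Int) : Bool :=
  let crc := (PySem.List.pyRange 0 (buffer.length : Int) 1).foldl
    (fun crc x => stepA crc (PySem.List.pyGetD buffer x 0)) 0
  decide (crc = 0)

-- ===== PORT B =====
-- one bit of polynomial division (the body of B's table-building inner loop)
def bitstep (crc : Int) : Int :=
  if PySem.Int.band crc 0x8000 ≠ 0 then
    PySem.Int.band (PySem.Int.bxor (crc <<< (1:Nat)) 0x1021) 0xffff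
  else
    PySem.Int.band (crc <<< (1:Nat)) 0xffff

-- B's precomputed table: the CRC of each byte value by bit-serial division
def tableB : List Int :=
  (PySem.List.pyRange 0 256 1).foldl
    (fun (acc : List Int) (i : Int) => acc ++ [(PySem.List.pyRange 0 8 1).foldl (fun c _ => bitstep c) (i <<< (8:Nat))]) []

-- B's outer-loop body: rotate/xor in the element, then one table lookup
def stepB (crc b : Int) : Int :=
  let y := PySem.Int.bxor (PySem.Int.band (PySem.Int.bor (crc >>> (8:Nat)) (crc <<< (8:Nat))) 0xffff) b
  PySem.Int.bxor (PySem.Int.bxor y (PySem.Int.band y 0xff))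
    (PySem.List.pyGetD tableB (PySem.Int.band y 0xff) 0)

def verify_crc_py_alt (buffer : List Int) : Bool :=
  let crc := buffer.foldl (fun crc b => stepB crc b) 0
  decide (crc = 0)

-- ===== PRECONDITION & SPEC =====
def Spec_verify_crc_py (buffer : List Int) (out : Bool) : Prop := out = verify_crc_py_alt buffer
instance (buffer : List Int) (out : Bool) : Decidable (Spec_verify_crc_py buffer out) := by unfold Spec_verify_crc_py; infer_instance

-- ===== CLAIM (what is proved, stated in full; the proofs are below) =====
def Claim_equal_verify_crc_py : Prop := ∀ (buffer : List Int), Dom_verify_crc_py buffer → Spec_verify_crc_py buffer (verify_crc_py buffer)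

-- ===== LEMMAS AND PROOFS =====

-- Nat mirror of the bit-serial division
def bitstepN (c : Nat) : Nat :=
  if c &&& 32768 ≠ 0 then ((c <<< 1) ^^^ 4129) &&& 65535 else (c <<< 1) &&& 65535

def iterN : Nat → Nat → Nat
  | 0, y => y
  | n+1, y => iterN n (bitstepN y)

-- the cumulative xor amount of A's three tail steps, as a function of the low byte
def xAmt (j : Nat) : Nat :=
  let a1 := (j >>> 4) &&& 65535
  let a2 := ((j ^^^ a1) &&& 15) <<< 12
  let a3 := (((j ^^^ a1) &&& 255) <<< 5) &&& 65535
  (a1 ^^^ a2) ^^^ a3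

set_option maxRecDepth 4000 in
lemma pvXAmt : ∀ j < 256, xAmt j = j ^^^ iterN 8 (j <<< 8) := by decide

-- ===== basic Nat bit facts =====
lemma pvAndShlLow (a b k : Nat) (h : a < 2 ^ k) : (b <<< k) &&& a = 0 := by
  apply Nat.eq_of_testBit_eq; intro i
  simp only [Nat.testBit_and, Nat.testBit_shiftLeft, Nat.zero_testBit]
  by_cases hik : k ≤ i
  · have : a.testBit i = false :=
      Nat.testBit_lt_two_pow (lt_of_lt_of_le h (Nat.pow_le_pow_right (by norm_num) hik))
    simp [this]
  · simp [hik]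

lemma pvOrXor (a b : Nat) (h : a &&& b = 0) : a ||| b = a ^^^ b := by
  apply Nat.eq_of_testBit_eq; intro i
  have hb := congrArg (fun x => Nat.testBit x i) h
  simp only [Nat.testBit_and, Nat.zero_testBit] at hb
  simp only [Nat.testBit_or, Nat.testBit_xor]
  cases ha : a.testBit i <;> cases hbb : b.testBit i <;> simp_all

lemma pvShlXorAdd (a b k : Nat) (h : b < 2 ^ k) : (a <<< k) ^^^ b = a <<< k + b := by
  rw [← pvOrXor _ _ (pvAndShlLow b a k h)]
  exact (Nat.shiftLeft_add_eq_or_of_lt h a).symm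

lemma pvAnd1 (y : Nat) : y &&& 1 = y % 2 := by
  simpa using Nat.and_two_pow_sub_one_eq_mod y 1

lemma pvAnd15 (y : Nat) : y &&& 15 = y % 16 := by
  simpa using Nat.and_two_pow_sub_one_eq_mod y 4

lemma pvAnd255 (y : Nat) : y &&& 255 = y % 256 := by
  simpa using Nat.and_two_pow_sub_one_eq_mod y 8

lemma pvAnd65535 (y : Nat) : y &&& 65535 = y % 65536 := by
  simpa using Nat.and_two_pow_sub_one_eq_mod y 16

lemma pvAndDiv2 (a b : Nat) : (a &&& b) / 2 = a / 2 &&& b / 2 := by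
  apply Nat.eq_of_testBit_eq; intro i
  simp [Nat.testBit_div_two, Nat.testBit_and]

lemma pvXorDiv2 (a b : Nat) : (a ^^^ b) / 2 = a / 2 ^^^ b / 2 := by
  apply Nat.eq_of_testBit_eq; intro i
  simp [Nat.testBit_div_two, Nat.testBit_xor]

lemma pvAndBit0 (a b : Nat) : (a &&& b) &&& 1 = (a &&& 1) &&& (b &&& 1) := by
  apply Nat.eq_of_testBit_eq; intro i
  simp only [Nat.testBit_and]
  cases a.testBit i <;> cases b.testBit i <;> simp

lemma pvXorBit0 (a b : Nat) : (a ^^^ b) &&& 1 = (a &&& 1) ^^^ (b &&& 1) := by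
  apply Nat.eq_of_testBit_eq; intro i
  simp only [Nat.testBit_and, Nat.testBit_xor]
  cases a.testBit i <;> cases b.testBit i <;> simp

lemma pvXorAdd (a : Nat) : ∀ b : Nat, a &&& b = 0 → a + b = a ^^^ b := by
  induction a using Nat.strong_induction_on with
  | _ a ih =>
    intro b h
    by_cases ha : a = 0
    · subst ha; simp
    · have h2 : a / 2 &&& b / 2 = 0 := by rw [← pvAndDiv2, h]
      have h0 : (a % 2) &&& (b % 2) = 0 := by
        have h' : (a &&& b) &&& 1 = 0 := by rw [h]; decide
        rw [pvAndBit0, pvAnd1, pvAnd1] at h'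
        exact h'
      have e1 : a ^^^ b = 2 * (a / 2 ^^^ b / 2) + ((a % 2) ^^^ (b % 2)) := by
        have d1 : (a ^^^ b) / 2 = a / 2 ^^^ b / 2 := pvXorDiv2 a b
        have d2 : (a ^^^ b) % 2 = (a % 2) ^^^ (b % 2) := by
          have := pvXorBit0 a b
          simpa [pvAnd1] using this
        omega
      have e2 : a / 2 + b / 2 = a / 2 ^^^ b / 2 := ih (a / 2) (by omega) (b / 2) h2
      have e3 : a % 2 + b % 2 = (a % 2) ^^^ (b % 2) := by
        rcases Nat.mod_two_eq_zero_or_one a with h1 | h1 <;>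
          rcases Nat.mod_two_eq_zero_or_one b with h4 | h4 <;>
            simp [h1, h4] at h0 ⊢
      omega

lemma pvAndIdem (x m : Nat) : (x &&& m) &&& m = x &&& m := by
  rw [Nat.and_assoc, Nat.and_self]

lemma pvSubMask (m b : Nat) (h : b &&& m = b) : m - b = m ^^^ b := by
  have hba : b ≤ m := by
    conv_lhs => rw [← h]
    exact Nat.and_le_right
  have hd : (m ^^^ b) &&& b = 0 := by
    rw [Nat.and_xor_distrib_right, Nat.and_self, Nat.and_comm m b, h, Nat.xor_self]
  have hadd : (m ^^^ b) + b = (m ^^^ b) ^^^ b := pvXorAdd (m ^^^ b) b hd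
  have hcancel : (m ^^^ b) ^^^ b = m := by
    rw [Nat.xor_assoc, Nat.xor_self, Nat.xor_zero]
  omega

lemma pvAndSmall (x : Nat) (h : x < 256) : x &&& 255 = x := by
  rw [pvAnd255]; omega

lemma pvLow15 (a : Nat) : (a &&& 255) &&& 15 = a &&& 15 := by
  rw [Nat.and_assoc, show ((255:Nat) &&& 15) = 15 from by decide]

lemma pvN12 (x : Nat) : (x <<< 12) &&& 65535 = (x &&& 15) <<< 12 := by
  rw [pvAnd65535, pvAnd15, Nat.shiftLeft_eq, Nat.shiftLeft_eq]
  have h12 : (2:Nat) ^ 12 = 4096 := by norm_num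
  rw [h12]
  omega

-- ===== Int-level case lemmas (two's complement) =====
lemma pvKxorN (a n : Nat) : PySem.Int.bxor (Int.negSucc a) ((n : Nat) : Int) = Int.negSucc (a ^^^ n) := by
  unfold PySem.Int.bxor
  simp [Int.negSucc_eq]
  omega

lemma pvKandN (a m : Nat) : PySem.Int.band (Int.negSucc a) ((m : Nat) : Int) = ((m - (m &&& a) : Nat) : Int) := by
  unfold PySem.Int.band
  simp [Int.negSucc_eq]
  omega

lemma pvKshlN (a s : Nat) : (Int.negSucc a) <<< (s : Nat) = Int.negSucc ((a + 1) <<< s - 1) := rfl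

lemma pvKshlP (a s : Nat) : ((a : Nat) : Int) <<< (s : Nat) = ((a <<< s : Nat) : Int) :=
  (Int.natCast_shiftLeft a s).symm

lemma pvKshrP (a s : Nat) : ((a : Nat) : Int) >>> (s : Nat) = ((a >>> s : Nat) : Int) :=
  (Int.natCast_shiftRight a s).symm

lemma pvCast65535 : (65535:Int) = ((65535:Nat):Int) := by norm_num
lemma pvCast255 : (255:Int) = ((255:Nat):Int) := by norm_num
lemma pvCast4129 : (4129:Int) = ((4129:Nat):Int) := by norm_num
lemma pvCast32768 : (32768:Int) = ((32768:Nat):Int) := by norm_num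

-- A's masked shift of a negative intermediate value
lemma pvA2Neg (w : Nat) :
    PySem.Int.band ((Int.negSucc w) <<< (12:Nat)) ((65535:Nat):Int) = (((15 - (w &&& 15)) <<< 12 : Nat) : Int) := by
  rw [pvKshlN, pvKandN]
  congr 1
  have h12 : (2:Nat) ^ 12 = 4096 := by norm_num
  have h1 : (w + 1) <<< 12 - 1 = (w <<< 12) + 4095 := by
    rw [Nat.shiftLeft_eq, Nat.shiftLeft_eq, h12]; omega
  have h2 : (w <<< 12) + 4095 = (w <<< 12) ^^^ 4095 := (pvShlXorAdd w 4095 12 (by norm_num)).symm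
  have h3 : (65535:Nat) &&& ((w <<< 12) ^^^ 4095) = ((w &&& 15) <<< 12) ^^^ 4095 := by
    rw [Nat.and_xor_distrib_left]
    have hx : (65535:Nat) &&& (w <<< 12) = (w &&& 15) <<< 12 := by
      rw [Nat.and_comm]; exact pvN12 w
    rw [hx, show ((65535:Nat) &&& 4095) = 4095 from by decide]
  have h4 : ((w &&& 15) <<< 12) ^^^ 4095 = ((w &&& 15) <<< 12) + 4095 :=
    pvShlXorAdd (w &&& 15) 4095 12 (by norm_num)
  rw [h1, h2, h3, h4]
  have hw : w &&& 15 ≤ 15 := by rw [pvAnd15]; omega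
  rw [Nat.shiftLeft_eq, Nat.shiftLeft_eq, h12]
  omega

-- ===== table lemmas =====
lemma pvBitBridge (m : Nat) : bitstep ((m:Nat):Int) = ((bitstepN m : Nat) : Int) := by
  unfold bitstep bitstepN
  rw [pvCast32768, PySem.Int.band_natCast]
  by_cases h : m &&& 32768 = 0
  · simp only [h, Nat.cast_zero, ne_eq, not_true_eq_false, if_false]
    simp only [pvCast65535, ← Int.natCast_shiftLeft, PySem.Int.band_natCast]
  · have h' : ((m &&& 32768 : Nat) : Int) ≠ 0 := by exact_mod_cast h
    simp only [h, h', ne_eq, not_false_eq_true, if_true]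
    simp only [pvCast65535, pvCast4129, ← Int.natCast_shiftLeft,
      PySem.Int.band_natCast, PySem.Int.bxor_natCast]

lemma pvRange8 : PySem.List.pyRange 0 8 1 = [0, 1, 2, 3, 4, 5, 6, 7] := by decide

lemma pvTableMap : tableB = (PySem.List.pyRange 0 256 1).map
    (fun (i : Int) => (PySem.List.pyRange 0 8 1).foldl (fun c _ => bitstep c) (i <<< (8:Nat))) := by
  unfold tableB
  rw [PySem.List.foldl_append_singleton_eq_map, List.nil_append]

lemma pvInner (j : Nat) :
    (PySem.List.pyRange 0 8 1).foldl (fun c _ => bitstep c) (((j:Nat):Int) <<< (8:Nat)) = ((iterN 8 (j <<< 8) : Nat) : Int) := by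
  rw [pvRange8, pvKshlP]
  simp only [List.foldl_cons, List.foldl_nil, pvBitBridge]
  rfl

lemma pvGetTable (j : Nat) (hj : j < 256) :
    PySem.List.pyGetD tableB ((j:Nat):Int) 0 = ((iterN 8 (j <<< 8) : Nat) : Int) := by
  rw [pvTableMap,
    PySem.List.pyGetD_map_pyRange_of_nonneg _ 256 _ 0 (by positivity) (by exact_mod_cast hj)]
  exact pvInner j

-- ===== the shared final Nat identity =====
lemma pvFinal (a j : Nat) (hj : j < 256) :
    ((a ^^^ ((j >>> 4) &&& 65535)) ^^^ (((j ^^^ ((j >>> 4) &&& 65535)) &&& 15) <<< 12)) ^^^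
      ((((j ^^^ ((j >>> 4) &&& 65535)) &&& 255) <<< 5) &&& 65535)
    = (a ^^^ j) ^^^ iterN 8 (j <<< 8) := by
  have h := pvXAmt j hj
  have h2 : iterN 8 (j <<< 8) = j ^^^ xAmt j := by
    rw [h, ← Nat.xor_assoc, Nat.xor_self, Nat.zero_xor]
  rw [h2]
  simp only [xAmt, Nat.xor_assoc, Nat.xor_xor_cancel_left]

-- A2/A3 abbreviations appear inline; the two branches below reduce both ports to pvFinal
lemma pvPosA2 (a j u : Nat) (hja : j = a &&& 255) :
    ((a ^^^ u) <<< 12) &&& 65535 = ((j ^^^ u) &&& 15) <<< 12 := by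
  rw [pvN12]
  congr 1
  rw [Nat.and_xor_distrib_right, Nat.and_xor_distrib_right, hja, pvLow15]

lemma pvPosA3 (a j u t : Nat) (hja : j = a &&& 255) (ht : t &&& 255 = 0) :
    ((a ^^^ u) ^^^ t) &&& 255 = (j ^^^ u) &&& 255 := by
  rw [Nat.and_xor_distrib_right, ht, Nat.xor_zero, Nat.and_xor_distrib_right,
    Nat.and_xor_distrib_right, hja, pvAndIdem]

lemma pvNegJ15 (a j : Nat) (hja : j = 255 - (255 &&& a)) : j &&& 15 = 15 ^^^ (a &&& 15) := by
  have hsub : (255 &&& a) &&& 255 = 255 &&& a := by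
    rw [Nat.and_comm 255 a, pvAndIdem]
  rw [hja, pvSubMask 255 (255 &&& a) hsub, Nat.and_xor_distrib_right,
    show ((255:Nat) &&& 15) = 15 from by decide, Nat.and_comm 255 a, pvLow15]

lemma pvNegA2 (a j u : Nat) (hja : j = 255 - (255 &&& a)) :
    (15 - ((a ^^^ u) &&& 15)) <<< 12 = ((j ^^^ u) &&& 15) <<< 12 := by
  congr 1
  have e1 : (j ^^^ u) &&& 15 = 15 ^^^ ((a ^^^ u) &&& 15) := by
    rw [Nat.and_xor_distrib_right, pvNegJ15 a j hja, Nat.xor_assoc, ← Nat.and_xor_distrib_right]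
  rw [e1]
  exact pvSubMask 15 _ (pvAndIdem _ 15)

lemma pvNegA3 (a j u t : Nat) (hja : j = 255 - (255 &&& a)) (hj : j < 256) (ht : 255 &&& t = 0) :
    255 - (255 &&& ((a ^^^ u) ^^^ t)) = (j ^^^ u) &&& 255 := by
  have hW : 255 &&& ((a ^^^ u) ^^^ t) = (255 &&& a) ^^^ (255 &&& u) := by
    rw [Nat.and_xor_distrib_left, ht, Nat.xor_zero, Nat.and_xor_distrib_left]
  rw [hW]
  have hsub : ((255 &&& a) ^^^ (255 &&& u)) &&& 255 = (255 &&& a) ^^^ (255 &&& u) := by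
    rw [Nat.and_xor_distrib_right, Nat.and_comm 255 a, pvAndIdem, Nat.and_comm 255 u, pvAndIdem]
  rw [pvSubMask 255 _ hsub, ← Nat.xor_assoc]
  have hjx : 255 ^^^ (255 &&& a) = j := by
    rw [hja, pvSubMask 255 (255 &&& a) (by rw [Nat.and_comm 255 a, pvAndIdem])]
  rw [hjx, Nat.and_xor_distrib_right, pvAndSmall j hj, Nat.and_comm 255 u]

-- ===== the per-element step equality =====
lemma pvStepEq (crc b : Int) : stepA crc b = stepB crc b := by
  simp only [stepA, stepB]
  generalize PySem.Int.bxor (PySem.Int.band (PySem.Int.bor (crc >>> (8:Nat)) (crc <<< (8:Nat))) 65535) b = y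
  cases y with
  | ofNat a =>
    simp only [Int.ofNat_eq_natCast]
    have hj : a &&& 255 < 256 := by rw [pvAnd255]; omega
    simp only [pvCast255, pvCast65535, PySem.Int.band_natCast, PySem.Int.bxor_natCast,
      ← Int.natCast_shiftLeft, ← Int.natCast_shiftRight]
    rw [pvGetTable (a &&& 255) hj]
    simp only [PySem.Int.bxor_natCast]
    rw [Nat.cast_inj]
    rw [pvPosA2 a (a &&& 255) _ rfl, pvPosA3 a (a &&& 255) _ _ rfl (pvAndShlLow 255 _ 12 (by norm_num))]
    exact pvFinal a (a &&& 255) hj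
  | negSucc a =>
    have hj : 255 - (255 &&& a) < 256 := by omega
    simp only [pvCast255, pvCast65535]
    rw [pvKandN a 255]
    simp only [pvKshrP, PySem.Int.band_natCast]
    simp only [pvKxorN]
    rw [pvA2Neg, pvNegA2 a (255 - (255 &&& a)) _ rfl]
    simp only [pvKxorN]
    rw [pvKandN, pvNegA3 a (255 - (255 &&& a)) _ _ rfl hj
      (by rw [Nat.and_comm]; exact pvAndShlLow 255 _ 12 (by norm_num))]
    simp only [pvKshlP, PySem.Int.band_natCast, pvKxorN]
    rw [pvGetTable (255 - (255 &&& a)) hj]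
    simp only [pvKxorN]
    rw [Int.negSucc.injEq]
    exact pvFinal a (255 - (255 &&& a)) hj

lemma pvFoldEq (l : List Int) (init : Int) :
    l.foldl stepA init = l.foldl (fun crc b => stepB crc b) init := by
  have : stepA = fun crc b => stepB crc b := by
    funext crc b; exact pvStepEq crc b
  rw [this]

-- ===== VERDICT (by name: the statement is the Claim_ definition above) =====
theorem verify_crc_py_spec : Claim_equal_verify_crc_py := by
  intro buffer _
  unfold Spec_verify_crc_py verify_crc_py verify_crc_py_alt
  rw [PySem.List.foldl_pyRange_zero_pyGetD' buffer 0 stepA 0, pvFoldEq]
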